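-- pv_equiv track=rewrite | github.com/alicedini/Bioinformatics-Assignments | Ex3.py | ordered_occurrences_ranges
-- ===== SOURCE A (Python) =====
-- def ordered_occurrences_ranges(matrix):
--     #Takes the Burrows-Wheeler matrix as input
--     #Creates a dictionary storing the range of rows where each character starts and ends
--     #Keys are characters in the first column; values are lists storing the range.
--     F = [x[0] for x in matrix]
--     rank = {}
--     for i in range(len(F)):
--         if F[i] not in rank:
--             rank[F[i]] = [i,i+1]
--         else:
--             rank[F[i]][1] += 1
--     return rank
-- ===== SOURCE B (Python) =====
-- def ordered_occurrences_ranges(matrix):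
--     # Count-then-build: one pass totals per first-column character, one pass
--     # first-occurrence indices, then ranges are [first, first + count].
--     F = [x[0] for x in matrix]
--     count = {}
--     for c in F:
--         count[c] = count.get(c, 0) + 1
--     first = {}
--     for i, c in enumerate(F):
--         if c not in first:
--             first[c] = i
--     return {c: [i, i + count[c]] for c, i in first.items()}
-- ===== Notes on version B (the rewrite author's own statement) =====
-- stated objective: alternative
-- what changed: A maintains the ranges themselves in one incremental pass (insert [i,i+1], then bump the end on every repeat); B first builds a total-count table and a first-occurrence-index table and then constructs each range as [first, first+count] in a final comprehension.
import Mathlib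
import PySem

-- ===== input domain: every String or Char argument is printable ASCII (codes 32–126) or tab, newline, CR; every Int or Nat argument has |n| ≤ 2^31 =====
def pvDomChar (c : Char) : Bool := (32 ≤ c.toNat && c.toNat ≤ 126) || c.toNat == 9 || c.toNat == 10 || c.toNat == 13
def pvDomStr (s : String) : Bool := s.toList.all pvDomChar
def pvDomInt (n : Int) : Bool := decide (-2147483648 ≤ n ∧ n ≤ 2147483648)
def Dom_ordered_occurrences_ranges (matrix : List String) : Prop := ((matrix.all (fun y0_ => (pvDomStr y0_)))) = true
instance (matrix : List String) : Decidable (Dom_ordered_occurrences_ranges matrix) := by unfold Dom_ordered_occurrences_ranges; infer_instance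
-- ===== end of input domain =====

-- B replaces A's single incremental range-updating pass by a count-table + first-index-table
-- decomposition and builds each range as [first, first+count] at the end (alternative, same cost).


-- ===== PORT A =====
-- `rank[F[i]][1] += 1` on the 2-element lists this dict stores (exact there: the list always has the form [a, b])
def pvBump1 (l : List Int) : List Int :=
  match l with
  | a :: b :: t => a :: (b + 1) :: t
  | l => l

def ordered_occurrences_ranges (matrix : List String) : List (String × List Int) :=
  -- F = [x[0] for x in matrix]; x[0] is a 1-char string (Pre_ excludes the empty strings, where Python raises IndexError)
  let F : List String := matrix.map (fun x => ((PySem.Str.pyGet? x 0).map (fun c => String.ofList [c])).getD "")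
  let rank : PySem.Dict String (List Int) :=
    (PySem.List.pyRange 0 (F.length : Int) 1).foldl
      (fun d i =>
        let c := PySem.List.pyGetD F i ""
        if d.contains c = false then d.insert c [i, i + 1]
        else d.modify c [] pvBump1)
      PySem.Dict.empty
  rank.items

-- ===== PORT B =====
def ordered_occurrences_ranges_alt (matrix : List String) : List (String × List Int) :=
  let F : List String := matrix.map (fun x => ((PySem.Str.pyGet? x 0).map (fun c => String.ofList [c])).getD "")
  let count : PySem.Dict String Int :=
    F.foldl (fun d c => d.insert c (d.getD c 0 + 1)) PySem.Dict.empty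
  let first : PySem.Dict String Int :=
    (PySem.List.enumerate F 0).foldl
      (fun d p => if d.contains p.2 then d else d.insert p.2 p.1) PySem.Dict.empty
  first.items.map (fun p => (p.1, [p.2, p.2 + count.getD p.1 0]))

-- ===== PRECONDITION & SPEC =====
-- Pre_ excludes matrices containing an empty string, on which Python A raises IndexError at x[0].
def Pre_ordered_occurrences_ranges (matrix : List String) : Prop := ∀ s ∈ matrix, s ≠ ""
instance (matrix : List String) : Decidable (Pre_ordered_occurrences_ranges matrix) := by unfold Pre_ordered_occurrences_ranges; infer_instance
def pvWitness_ordered_occurrences_ranges : List String := ["ba", "ab", "b"]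
def Spec_ordered_occurrences_ranges (matrix : List String) (out : List (String × List Int)) : Prop := out = ordered_occurrences_ranges_alt matrix
instance (matrix : List String) (out : List (String × List Int)) : Decidable (Spec_ordered_occurrences_ranges matrix out) := by unfold Spec_ordered_occurrences_ranges; infer_instance

-- ===== CLAIM (what is proved, stated in full; the proofs are below) =====
def Claim_equal_ordered_occurrences_ranges : Prop := ∀ (matrix : List String), Dom_ordered_occurrences_ranges matrix → Pre_ordered_occurrences_ranges matrix → Spec_ordered_occurrences_ranges matrix (ordered_occurrences_ranges matrix)

-- ===== LEMMAS AND PROOFS =====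

-- the three loop states, as functions of the extracted first column F
def pvRank (F : List String) : PySem.Dict String (List Int) :=
  (PySem.List.enumerate F 0).foldl
    (fun d p => if d.contains p.2 = false then d.insert p.2 [p.1, p.1 + 1]
                else d.modify p.2 [] pvBump1) PySem.Dict.empty

def pvCount (F : List String) : PySem.Dict String Int :=
  F.foldl (fun d c => d.insert c (d.getD c 0 + 1)) PySem.Dict.empty

def pvFirst (F : List String) : PySem.Dict String Int :=
  (PySem.List.enumerate F 0).foldl
    (fun d p => if d.contains p.2 then d else d.insert p.2 p.1) PySem.Dict.empty

lemma pv_enum_append {α : Type} (l : List α) (x : α) :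
    ∀ s : Int, PySem.List.enumerate (l ++ [x]) s
      = PySem.List.enumerate l s ++ [(s + l.length, x)] := by
  induction l with
  | nil => intro s; simp [PySem.List.enumerate_cons, PySem.List.enumerate_nil]
  | cons y l ih =>
    intro s
    simp only [List.cons_append, PySem.List.enumerate_cons, ih (s + 1), List.length_cons]
    push_cast
    ring_nf

-- 'for i in range(len(xs)): … i … xs[i] …' is a fold over enumerate(xs)
lemma pv_bridge {α σ : Type} (f : σ → Int → α → σ) (dflt : α) :
    ∀ (F pre : List α) (init : σ),
      (PySem.List.pyRange (pre.length : Int) ((pre.length : Int) + F.length) 1).foldl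
          (fun acc i => f acc i (PySem.List.pyGetD (pre ++ F) i dflt)) init
        = (PySem.List.enumerate F (pre.length : Int)).foldl (fun acc p => f acc p.1 p.2) init := by
  intro F
  induction F with
  | nil =>
    intro pre init
    rw [PySem.List.pyRange_one_eq_nil (by simp)]
    simp [PySem.List.enumerate_nil]
  | cons x F ih =>
    intro pre init
    rw [PySem.List.pyRange_one_cons (by simp only [List.length_cons]; push_cast; omega)]
    simp only [List.foldl_cons, PySem.List.enumerate_cons]
    have h1 : PySem.List.pyGetD (pre ++ x :: F) (pre.length : Int) dflt = x := by
      simp [PySem.List.pyGetD]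
    rw [h1]
    have h2 := ih (pre ++ [x]) (f init (pre.length : Int) x)
    simp only [List.append_assoc, List.singleton_append, List.length_append,
      List.length_singleton] at h2
    have e1 : ((pre.length : Int) + 1) = ((pre.length + 1 : Nat) : Int) := by push_cast; ring
    have e2 : ((pre.length : Int) + ((x :: F).length : Int)) = ((pre.length + 1 : Nat) : Int) + (F.length : Int) := by
      simp only [List.length_cons]; push_cast; ring
    rw [e1, e2, h2]

-- the invariant: A's dict is B's first-index dict decorated with [first, first+count]
lemma pv_main : ∀ F : List String,
    (pvRank F).items
        = (pvFirst F).items.map (fun p => (p.1, [p.2, p.2 + (pvCount F).getD p.1 0]))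
      ∧ (pvFirst F).keys.Nodup
      ∧ (∀ c, c ∈ (pvFirst F).keys ↔ c ∈ F) := by
  intro F
  induction F using List.reverseRecOn with
  | nil =>
    refine ⟨rfl, ?_, ?_⟩ <;> simp [pvFirst, PySem.List.enumerate_nil, PySem.Dict.empty, PySem.Dict.keys]
  | append_singleton F x ih =>
    obtain ⟨hitems, hnd, hmem⟩ := ih
    have he := pv_enum_append F x 0
    simp only [zero_add] at he
    have hRank : pvRank (F ++ [x]) =
        (if (pvRank F).contains x = false then (pvRank F).insert x [(F.length : Int), (F.length : Int) + 1]
         else (pvRank F).modify x [] pvBump1) := by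
      simp only [pvRank, he, List.foldl_append, List.foldl_cons, List.foldl_nil]
    have hFirst : pvFirst (F ++ [x]) =
        (if (pvFirst F).contains x then pvFirst F else (pvFirst F).insert x (F.length : Int)) := by
      simp only [pvFirst, he, List.foldl_append, List.foldl_cons, List.foldl_nil]
    have hCount : pvCount (F ++ [x]) = (pvCount F).insert x ((pvCount F).getD x 0 + 1) := by
      simp only [pvCount, List.foldl_append, List.foldl_cons, List.foldl_nil]
    set n : Int := (F.length : Int) with hn
    set R := pvRank F with hR
    set Fi := pvFirst F with hFi
    set C := pvCount F with hC
    have hkeysR : R.keys = Fi.keys := by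
      show R.items.map Prod.fst = Fi.items.map Prod.fst
      rw [hitems, List.map_map]; rfl
    have hcont : R.contains x = Fi.contains x := by
      rw [PySem.Dict.contains_eq_decide_mem_keys, PySem.Dict.contains_eq_decide_mem_keys, hkeysR]
    have hndR : R.keys.Nodup := hkeysR ▸ hnd
    by_cases hc : Fi.contains x = true
    · have hxF : x ∈ F := (hmem x).1 ((PySem.Dict.contains_iff_mem_keys Fi x).1 hc)
      have hF1 : pvFirst (F ++ [x]) = Fi := by rw [hFirst, if_pos hc]
      obtain ⟨i0, hp0⟩ : ∃ i0, (x, i0) ∈ Fi.items := by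
        obtain ⟨⟨c0, i0⟩, hp0, hp0x⟩ := List.mem_map.1
          (show x ∈ Fi.items.map Prod.fst from (PySem.Dict.contains_iff_mem_keys Fi x).1 hc)
        exact ⟨i0, by cases hp0x; exact hp0⟩
      have hR0 : R.getD x [] = [i0, i0 + C.getD x 0] := by
        apply PySem.Dict.getD_of_mem_items _ _ hndR
        rw [hitems]
        exact List.mem_map.2 ⟨(x, i0), hp0, rfl⟩
      have hR1 : pvRank (F ++ [x]) = R.insert x (pvBump1 (R.getD x [])) := by
        rw [hRank, if_neg (by rw [hcont, hc]; simp)]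
        rfl
      refine ⟨?_, hF1 ▸ hnd, ?_⟩
      · rw [hR1, hF1, PySem.Dict.items_insert_of_contains _ _ (by rw [hcont]; exact hc),
          hitems, List.map_map, hCount]
        apply List.map_congr_left
        intro p hp
        by_cases hpx : p.1 = x
        · have hp2 : p.2 = i0 := by
            have h1 := PySem.Dict.get?_of_mem_items Fi (show (x, p.2) ∈ Fi.items by
              obtain ⟨a, b⟩ := p; cases hpx; exact hp) hnd
            have h2 := PySem.Dict.get?_of_mem_items Fi hp0 hnd
            rw [h1] at h2
            exact Option.some_inj.1 h2
          simp only [Function.comp_apply, hpx, hR0, hp2, beq_self_eq_true, if_true,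
            PySem.Dict.getD_insert_self, pvBump1]
          simp [add_assoc]
        · simp only [Function.comp_apply]
          rw [if_neg (by simpa using hpx), PySem.Dict.getD_insert_of_ne _ _ _ hpx]
      · intro c
        rw [hF1]
        constructor
        · intro h; exact List.mem_append.2 (Or.inl ((hmem c).1 h))
        · intro h
          rcases List.mem_append.1 h with h | h
          · exact (hmem c).2 h
          · rw [List.mem_singleton.1 h]; exact (hmem x).2 hxF
    · have hcb : Fi.contains x = false := by simpa using hc
      have hxF : x ∉ F := fun h => hc ((PySem.Dict.contains_iff_mem_keys Fi x).2 ((hmem x).2 h))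
      have hF1 : pvFirst (F ++ [x]) = Fi.insert x n := by rw [hFirst, hcb]; rfl
      have hR1 : pvRank (F ++ [x]) = R.insert x [n, n + 1] := by
        rw [hRank, if_pos (by rw [hcont, hcb])]
      have hCx : C.getD x 0 = 0 := by
        rw [hC, pvCount, PySem.Dict.getD_foldl_insert_add_one, PySem.Dict.getD_empty,
          List.count_eq_zero.2 hxF]
        simp
      refine ⟨?_, hF1 ▸ PySem.Dict.nodup_keys_insert _ _ _ hnd, ?_⟩
      · rw [hR1, hF1, PySem.Dict.items_insert_of_not_contains _ _ (by rw [hcont]; exact hcb),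
          PySem.Dict.items_insert_of_not_contains _ _ hcb, hCount, List.map_append, hitems]
        congr 1
        · apply List.map_congr_left
          intro p hp
          have hpx : p.1 ≠ x := by
            intro e
            exact hxF (e ▸ (hmem p.1).1 (PySem.Dict.mem_keys_of_mem_items Fi hp))
          rw [PySem.Dict.getD_insert_of_ne _ _ _ hpx]
        · simp [PySem.Dict.getD_insert_self, hCx]
      · intro c
        rw [hF1, PySem.Dict.mem_keys_insert]
        constructor
        · rintro (h | h)
          · exact List.mem_append.2 (Or.inr (List.mem_singleton.2 h))
          · exact List.mem_append.2 (Or.inl ((hmem c).1 h))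
        · intro h
          rcases List.mem_append.1 h with h | h
          · exact Or.inr ((hmem c).2 h)
          · exact Or.inl (List.mem_singleton.1 h)

-- ===== VERDICT (by name: the statement is the Claim_ definition above) =====
theorem ordered_occurrences_ranges_spec : Claim_equal_ordered_occurrences_ranges := by
  intro matrix _ _
  unfold Spec_ordered_occurrences_ranges ordered_occurrences_ranges ordered_occurrences_ranges_alt
  set F : List String := matrix.map (fun x => ((PySem.Str.pyGet? x 0).map (fun c => String.ofList [c])).getD "") with hF
  have hb := pv_bridge
    (fun (d : PySem.Dict String (List Int)) (i : Int) (c : String) =>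
      if d.contains c = false then d.insert c [i, i + 1] else d.modify c [] pvBump1) "" F [] PySem.Dict.empty
  simp only [List.nil_append, List.length_nil, Int.natCast_zero, zero_add] at hb
  show ((PySem.List.pyRange 0 (F.length : Int) 1).foldl _ PySem.Dict.empty).items = _
  rw [hb]
  exact (pv_main F).1
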